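-- pv_equiv track=rewrite | github.com/AdityaMedidala/vit-qa-bot-backend | ingestion/chunking.py | safe_character_split
-- ===== SOURCE A (Python) =====
-- def safe_character_split(text: str, max_chars: int):
--     chunks = []
--     current = []
--
--     in_table = False
--     current_len = 0
--
--     for line in text.splitlines(keepends=True):
--         if "|" in line:
--             in_table = True
--         elif in_table and line.strip() == "":
--             in_table = False
--
--         #splitting logic checks for if it is outside table and if the current chunk is too long
--         if current_len + len(line) > max_chars and not in_table:
--             chunks.append("".join(current))
--             current = []
--             current_len = 0
--         current.append(line)
--         current_len += len(line)
--
--     #for final lines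
--     if current:
--         chunks.append("".join(current))
--
--     return chunks
-- ===== SOURCE B (Python) =====
-- def safe_character_split(text: str, max_chars: int):
--     # Same chunking, different decomposition: annotate lines with the table flag,
--     # then record chunk START OFFSETS into the text and recover chunks by slicing
--     # (no per-chunk line lists, no join).
--     lines = text.splitlines(keepends=True)
--     if not lines:
--         return []
--     flags = []
--     in_table = False
--     for ln in lines:
--         if "|" in ln:
--             in_table = True
--         elif in_table and ln.strip() == "":
--             in_table = False
--         flags.append(in_table)
--     starts = [0]
--     pos = 0
--     for ln, fl in zip(lines, flags):
--         if pos - starts[-1] + len(ln) > max_chars and not fl: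
--             starts.append(pos)
--         pos += len(ln)
--     return [text[a:b] for a, b in zip(starts, starts[1:] + [len(text)])]
-- ===== Notes on version B (the rewrite author's own statement) =====
-- stated objective: alternative
-- what changed: B first annotates every line with its table flag, then records chunk start OFFSETS into the text in one arithmetic pass and recovers each chunk as a slice text[a:b], instead of A's single pass that accumulates per-chunk line lists and joins them.
import Mathlib
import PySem

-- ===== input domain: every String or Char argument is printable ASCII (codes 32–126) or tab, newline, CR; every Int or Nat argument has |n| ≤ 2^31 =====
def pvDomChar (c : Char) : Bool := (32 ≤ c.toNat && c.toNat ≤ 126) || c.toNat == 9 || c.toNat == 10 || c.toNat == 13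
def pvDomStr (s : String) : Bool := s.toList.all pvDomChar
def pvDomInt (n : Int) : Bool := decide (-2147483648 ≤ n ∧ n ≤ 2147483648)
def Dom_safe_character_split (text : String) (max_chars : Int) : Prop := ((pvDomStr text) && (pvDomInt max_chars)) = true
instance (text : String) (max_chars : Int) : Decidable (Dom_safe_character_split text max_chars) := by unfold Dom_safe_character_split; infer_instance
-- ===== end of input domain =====

-- B records chunk start offsets and recovers chunks as slices of the text, instead of A's per-chunk line lists joined at each flush; same chunks, no speed claim.

-- ===== PORT A =====

-- hand port of str.splitlines(keepends=True): exact on the Dom alphabet, where '\n', '\r', '\r\n' are the only line boundaries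
def slKeepGo : List Char → List Char → List (List Char)
  | acc, [] => if acc.isEmpty then [] else [acc.reverse]
  | acc, '\r' :: '\n' :: rest => (acc.reverse ++ ['\r', '\n']) :: slKeepGo [] rest
  | acc, '\r' :: rest => (acc.reverse ++ ['\r']) :: slKeepGo [] rest
  | acc, '\n' :: rest => (acc.reverse ++ ['\n']) :: slKeepGo [] rest
  | acc, c :: rest => slKeepGo (c :: acc) rest

def splitlinesKeep (cs : List Char) : List (List Char) := slKeepGo [] cs

-- one iteration of A's for-loop; state = (chunks, current, in_table, current_len); "".join(current) = current.flatten
def aStep (max_chars : Int) (st : List (List Char) × List (List Char) × Bool × Int) (line : List Char) :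
    List (List Char) × List (List Char) × Bool × Int :=
  let chunks := st.1
  let current := st.2.1
  let in_table :=
    if PySem.Chars.isIn ['|'] line then true
    else if st.2.2.1 && (PySem.Chars.strip line == ([] : List Char)) then false
    else st.2.2.1
  let current_len := st.2.2.2
  if decide (current_len + (line.length : Int) > max_chars) && !in_table then
    (chunks ++ [current.flatten], [line], in_table, (line.length : Int))
  else
    (chunks, current ++ [line], in_table, current_len + (line.length : Int))

def safe_character_split (text : String) (max_chars : Int) : List String :=
  let st := (splitlinesKeep text.toList).foldl (aStep max_chars) ([], [], false, 0)
  let chunks := if st.2.1.isEmpty then st.1 else st.1 ++ [st.2.1.flatten]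
  chunks.map String.mk

-- ===== PORT B =====

-- pass 1 of Source B: the per-line table flags (flag recorded AFTER updating it for the line)
def annotGo : Bool → List (List Char) → List Bool
  | _, [] => []
  | t, line :: rest =>
    let t' :=
      if PySem.Chars.isIn ['|'] line then true
      else if t && (PySem.Chars.strip line == ([] : List Char)) then false
      else t
    t' :: annotGo t' rest

-- one iteration of Source B's offsets loop; state = (starts reversed so head = starts[-1], pos)
def bStep (max_chars : Int) (st : List Int × Int) (p : List Char × Bool) : List Int × Int :=
  let starts := st.1
  let pos := st.2
  let starts' :=
    if decide (pos - starts.headD 0 + (p.1.length : Int) > max_chars) && !p.2 then pos :: starts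
    else starts
  (starts', pos + (p.1.length : Int))

def safe_character_split_alt (text : String) (max_chars : Int) : List String :=
  let lines := splitlinesKeep text.toList
  if lines.isEmpty then []
  else
    let flags := annotGo false lines
    let st := (lines.zip flags).foldl (bStep max_chars) ([(0 : Int)], (0 : Int))
    let starts := st.1.reverse
    (starts.zip (starts.tail ++ [(text.toList.length : Int)])).map
      (fun ab => String.mk (PySem.List.slice text.toList (some ab.1) (some ab.2)))

-- ===== PRECONDITION & SPEC =====
def Spec_safe_character_split (text : String) (max_chars : Int) (out : List String) : Prop := out = safe_character_split_alt text max_chars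
instance (text : String) (max_chars : Int) (out : List String) : Decidable (Spec_safe_character_split text max_chars out) := by unfold Spec_safe_character_split; infer_instance

-- ===== CLAIM (what is proved, stated in full; the proofs are below) =====
def Claim_equal_safe_character_split : Prop := ∀ (text : String) (max_chars : Int), Dom_safe_character_split text max_chars → Spec_safe_character_split text max_chars (safe_character_split text max_chars)

-- ===== LEMMAS AND PROOFS =====

-- consecutive (start, stop) pairs of a starts list, last stop = `last`
def consec (l : List Int) (last : Int) : List (Int × Int) := l.zip (l.tail ++ [last])

def sliceF (full : List Char) (ab : Int × Int) : List Char := PySem.List.slice full (some ab.1) (some ab.2)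

lemma slKeepGo_flatten : ∀ (acc cs : List Char), (slKeepGo acc cs).flatten = acc.reverse ++ cs := by
  intro acc cs
  induction acc, cs using slKeepGo.induct <;> simp_all [slKeepGo]

lemma splitlinesKeep_flatten (cs : List Char) : (splitlinesKeep cs).flatten = cs := by
  simpa using slKeepGo_flatten [] cs

lemma consec_append_singleton (P : List Int) (s L : Int) :
    consec (P ++ [s]) L = consec P s ++ [(s, L)] := by
  cases P with
  | nil => simp [consec]
  | cons p P' =>
    simp only [consec, List.cons_append, List.tail_cons]
    have h : (p :: P').length = (P' ++ [s]).length := by simp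
    have hz := List.zip_append (l₁ := p :: P') (r₁ := [s]) (l₂ := P' ++ [s]) (r₂ := [L]) h
    simpa using hz

lemma slice_middle (a b c : List Char) :
    PySem.List.slice (a ++ b ++ c) (some (a.length : Int)) (some ((a.length : Int) + (b.length : Int))) = b := by
  rw [PySem.List.slice_natCast_add, List.append_assoc, List.drop_left, List.take_left]

lemma slice_last (pre mid post FULL : List Char) (h : FULL = pre ++ mid ++ post) :
    sliceF FULL ((pre.length : Int), (pre.length : Int) + (mid.length : Int)) = mid := by
  rw [sliceF, h]; exact slice_middle pre mid post

lemma main_lemma (m : Int) : ∀ (rem chunks cur : List (List Char)) (t : Bool) (srest : List Int)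
    (FULL : List Char),
    FULL = chunks.flatten ++ cur.flatten ++ rem.flatten →
    chunks = (consec srest.reverse ((chunks.flatten.length : Int))).map (sliceF FULL) →
    (rem = [] → cur ≠ []) →
    (let st := rem.foldl (aStep m) (chunks, cur, t, (cur.flatten.length : Int));
     if st.2.1.isEmpty then st.1 else st.1 ++ [st.2.1.flatten])
    = (consec ((rem.zip (annotGo t rem)).foldl (bStep m)
          (((chunks.flatten.length : Int)) :: srest,
           ((chunks.flatten.length : Int) + (cur.flatten.length : Int)))).1.reverse
        ((FULL.length : Int))).map (sliceF FULL) := by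
  intro rem
  induction rem with
  | nil =>
    intro chunks cur t srest FULL hfull hch hne
    have hcur : cur ≠ [] := hne rfl
    simp only [List.foldl_nil, List.zip_nil_left]
    rw [if_neg (by simpa [List.isEmpty_iff] using hcur)]
    have hrev : ((chunks.flatten.length : Int) :: srest).reverse
        = srest.reverse ++ [(chunks.flatten.length : Int)] := by simp
    rw [hrev, consec_append_singleton, List.map_append, ← hch]
    have hfull' : FULL = chunks.flatten ++ cur.flatten ++ [] := by simpa using hfull
    have hL : (FULL.length : Int) = (chunks.flatten.length : Int) + (cur.flatten.length : Int) := by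
      rw [hfull']; simp
    rw [List.map_cons, List.map_nil, hL, slice_last chunks.flatten cur.flatten [] FULL hfull']
  | cons ln rest ih =>
    intro chunks cur t srest FULL hfull hch hne
    set t' := (if PySem.Chars.isIn ['|'] ln then true
      else if t && (PySem.Chars.strip ln == ([] : List Char)) then false
      else t) with ht'
    have hannot : annotGo t (ln :: rest) = t' :: annotGo t' rest := by
      simp [annotGo, ht']
    have hzip : (ln :: rest).zip (annotGo t (ln :: rest)) = (ln, t') :: rest.zip (annotGo t' rest) := by
      rw [hannot]; rfl
    have hcond : (((chunks.flatten.length : Int) + (cur.flatten.length : Int))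
          - ((((chunks.flatten.length : Int)) :: srest).headD 0) + (ln.length : Int))
        = ((cur.flatten.length : Int) + (ln.length : Int)) := by
      simp only [List.headD_cons]; ring
    rw [hzip]
    simp only [List.foldl_cons]
    by_cases hC : (decide ((cur.flatten.length : Int) + (ln.length : Int) > m) && !t') = true
    · -- flush
      have hA : aStep m (chunks, cur, t, (cur.flatten.length : Int)) ln
          = (chunks ++ [cur.flatten], [ln], t', (ln.length : Int)) := by
        simp only [aStep, ← ht']
        rw [if_pos hC]
      have hB : bStep m (((chunks.flatten.length : Int)) :: srest,
            ((chunks.flatten.length : Int) + (cur.flatten.length : Int))) (ln, t')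
          = (((chunks.flatten.length : Int) + (cur.flatten.length : Int)) :: ((chunks.flatten.length : Int)) :: srest,
             ((chunks.flatten.length : Int) + (cur.flatten.length : Int)) + (ln.length : Int)) := by
        simp only [bStep]
        rw [hcond, if_pos hC]
      rw [hA, hB]
      have hlen1 : (((chunks ++ [cur.flatten]).flatten.length : Nat) : Int)
          = (chunks.flatten.length : Int) + (cur.flatten.length : Int) := by
        simp [List.flatten_append]
      have hlen2 : ((([ln] : List (List Char)).flatten.length : Nat) : Int) = (ln.length : Int) := by simp
      have hch' : chunks ++ [cur.flatten]
          = (consec (((chunks.flatten.length : Int)) :: srest).reverse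
              (((chunks ++ [cur.flatten]).flatten.length : Int))).map (sliceF FULL) := by
        rw [hlen1]
        have hrev : (((chunks.flatten.length : Int)) :: srest).reverse
            = srest.reverse ++ [(chunks.flatten.length : Int)] := by simp
        rw [hrev, consec_append_singleton, List.map_append, ← hch, List.map_cons, List.map_nil]
        rw [slice_last chunks.flatten cur.flatten ((ln :: rest).flatten) FULL hfull]
      have hres := ih (chunks ++ [cur.flatten]) [ln] t' ((chunks.flatten.length : Int) :: srest) FULL
        (by rw [hfull]; simp [List.flatten_append])
        hch'
        (by intro _; simp)
      rw [hlen1, hlen2] at hres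
      exact hres
    · -- no flush
      have hC' : (decide ((cur.flatten.length : Int) + (ln.length : Int) > m) && !t') = false := by
        exact Bool.eq_false_iff.mpr hC
      have hA : aStep m (chunks, cur, t, (cur.flatten.length : Int)) ln
          = (chunks, cur ++ [ln], t', (cur.flatten.length : Int) + (ln.length : Int)) := by
        simp only [aStep, ← ht']
        rw [if_neg (by rw [hC']; exact Bool.false_ne_true)]
      have hB : bStep m (((chunks.flatten.length : Int)) :: srest,
            ((chunks.flatten.length : Int) + (cur.flatten.length : Int))) (ln, t')
          = (((chunks.flatten.length : Int)) :: srest,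
             ((chunks.flatten.length : Int) + (cur.flatten.length : Int)) + (ln.length : Int)) := by
        simp only [bStep]
        rw [hcond, if_neg (by rw [hC']; exact Bool.false_ne_true)]
      rw [hA, hB]
      have hlen : (((cur ++ [ln]).flatten.length : Nat) : Int)
          = (cur.flatten.length : Int) + (ln.length : Int) := by
        simp [List.flatten_append]
      have hres := ih chunks (cur ++ [ln]) t' srest FULL
        (by rw [hfull]; simp [List.flatten_append])
        hch
        (by intro _; simp)
      rw [hlen] at hres
      rw [hres]
      congr 2
      ring_nf

-- ===== VERDICT (by name: the statement is the Claim_ definition above) =====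
theorem safe_character_split_spec : Claim_equal_safe_character_split := by
  intro text m _
  unfold Spec_safe_character_split safe_character_split safe_character_split_alt
  dsimp only
  by_cases hl : (splitlinesKeep text.toList).isEmpty = true
  · rw [if_pos hl]
    rw [List.isEmpty_iff] at hl
    simp [hl]
  · rw [if_neg hl]
    rw [List.isEmpty_iff] at hl
    have hflat : (splitlinesKeep text.toList).flatten = text.toList := splitlinesKeep_flatten _
    have hmain := main_lemma m (splitlinesKeep text.toList) [] [] false [] text.toList
      (by simp [hflat]) (by simp [consec]) (by intro h; exact absurd h hl)
    simp only [List.flatten_nil, List.length_nil, Nat.cast_zero, Int.add_zero] at hmain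
    have hlen : (text.toList.length : Int) = ((splitlinesKeep text.toList).flatten.length : Int) := by
      rw [hflat]
    rw [hmain]
    simp only [consec, List.map_map]
    rfl
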